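-- pv_equiv track=rewrite | github.com/gslavisam/Harmonix_AI | harmonix/core/guitar.py | _choose_root_fret
-- ===== SOURCE A (Python) =====
-- OPEN_STRING_MIDI = {
--     "E": 40,
--     "A": 45,
--     "D": 50,
--     "G": 55,
--     "B": 59,
--     "e": 64,
-- }
--
-- def _choose_root_fret(string_name: str, root_pitch_class: int) -> int:
--     preferred_frets = {
--         "E": (3, 5, 6, 8, 10, 1),
--         "A": (3, 5, 6, 8, 10, 1),
--         "D": (3, 5, 7, 9),
--         "G": (2, 4, 5, 7),
--         "B": (1, 3, 5, 6),
--         "e": (1, 3, 5, 7),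
--     }
--     open_pitch = OPEN_STRING_MIDI[string_name]
--     candidates = [
--         fret
--         for fret in range(0, 13)
--         if (open_pitch + fret) % 12 == root_pitch_class
--     ]
--     preference = preferred_frets.get(string_name, (3, 5, 7))
--     return min(candidates, key=lambda fret: (min(abs(fret - target) for target in preference), fret))
-- ===== SOURCE B (Python) =====
-- OPEN_STRING_MIDI = {
--     "E": 40,
--     "A": 45,
--     "D": 50,
--     "G": 55,
--     "B": 59,
--     "e": 64,
-- }
--
-- _PREFERRED_FRETS = {
--     "E": (3, 5, 6, 8, 10, 1),
--     "A": (3, 5, 6, 8, 10, 1),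
--     "D": (3, 5, 7, 9),
--     "G": (2, 4, 5, 7),
--     "B": (1, 3, 5, 6),
--     "e": (1, 3, 5, 7),
-- }
--
-- def _choose_root_fret(string_name: str, root_pitch_class: int) -> int:
--     # The matching frets in 0..12 are exactly base (and base+12 when base == 0):
--     # no scan needed, just modular arithmetic.
--     open_pitch = OPEN_STRING_MIDI[string_name]
--     base = (root_pitch_class - open_pitch) % 12
--     if base != 0:
--         return base
--     # Two candidates, 0 and 12: pick the one nearer the preferred frets (0 on ties).
--     preference = _PREFERRED_FRETS.get(string_name, (3, 5, 7))
--     d0 = min(abs(0 - t) for t in preference)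
--     d12 = min(abs(12 - t) for t in preference)
--     return 12 if d12 < d0 else 0
-- ===== Notes on version B (the rewrite author's own statement) =====
-- stated objective: simpler
-- what changed: Replaces A's 13-fret range scan and keyed min over the candidate list with a closed-form residue computation base = (root_pitch_class - open_pitch) % 12, returning base directly and deciding only the base == 0 corner (candidates 0 and 12) by comparing the two preference distances.
import Mathlib
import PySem

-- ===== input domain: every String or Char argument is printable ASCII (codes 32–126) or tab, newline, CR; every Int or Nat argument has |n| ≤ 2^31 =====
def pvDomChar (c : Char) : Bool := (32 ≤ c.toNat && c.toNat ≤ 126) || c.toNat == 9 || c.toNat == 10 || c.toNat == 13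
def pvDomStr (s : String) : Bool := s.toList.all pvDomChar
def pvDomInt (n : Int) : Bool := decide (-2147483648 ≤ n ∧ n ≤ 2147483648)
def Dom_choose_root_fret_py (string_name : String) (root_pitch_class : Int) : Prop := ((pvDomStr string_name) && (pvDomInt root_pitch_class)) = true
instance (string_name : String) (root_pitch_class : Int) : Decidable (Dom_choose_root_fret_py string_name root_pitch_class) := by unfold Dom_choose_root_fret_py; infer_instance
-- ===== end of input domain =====

-- B replaces A's 13-fret filtering scan with the closed-form residue (root - open) % 12,
-- deciding only the base == 0 corner (candidates 0 and 12) by the preference distances (objective: simpler).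

-- ===== PORT A =====
def pvOpenStringMidi : PySem.Dict String Int :=
  PySem.Dict.ofList [("E", 40), ("A", 45), ("D", 50), ("G", 55), ("B", 59), ("e", 64)]

def pvPreferredFrets : PySem.Dict String (List Int) :=
  PySem.Dict.ofList [("E", [3, 5, 6, 8, 10, 1]), ("A", [3, 5, 6, 8, 10, 1]), ("D", [3, 5, 7, 9]),
   ("G", [2, 4, 5, 7]), ("B", [1, 3, 5, 6]), ("e", [1, 3, 5, 7])]

-- min(abs(fret - target) for target in preference); 0 only for an empty preference (never happens)
def pvMinDist (fret : Int) (preference : List Int) : Int :=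
  (PySem.List.min? (preference.map (fun t => |fret - t|)) (fun x => x)).getD 0

def choose_root_fret_py (string_name : String) (root_pitch_class : Int) : Int :=
  -- open_pitch = OPEN_STRING_MIDI[string_name]  (KeyError on a missing key: excluded by Pre_)
  let open_pitch := (PySem.Dict.get? pvOpenStringMidi string_name).getD 0
  let candidates :=
    (PySem.List.pyRange 0 13 1).filter
      (fun fret => PySem.Int.mod (open_pitch + fret) 12 == root_pitch_class)
  let preference := PySem.Dict.getD pvPreferredFrets string_name [3, 5, 7]
  -- min(candidates, key=lambda fret: (minDist, fret)); ValueError on empty candidates: excluded by Pre_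
  (PySem.List.min2? candidates (fun fret => pvMinDist fret preference) (fun fret => fret)).getD 0

-- ===== PORT B =====
def choose_root_fret_py_alt (string_name : String) (root_pitch_class : Int) : Int :=
  let open_pitch := (PySem.Dict.get? pvOpenStringMidi string_name).getD 0
  let base := PySem.Int.mod (root_pitch_class - open_pitch) 12
  if base != 0 then base
  else
    let preference := PySem.Dict.getD pvPreferredFrets string_name [3, 5, 7]
    let d0 := (PySem.List.min? (preference.map (fun t => |(0 : Int) - t|)) (fun x => x)).getD 0
    let d12 := (PySem.List.min? (preference.map (fun t => |(12 : Int) - t|)) (fun x => x)).getD 0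
    if d12 < d0 then 12 else 0

-- ===== PRECONDITION & SPEC =====
-- Pre_ excludes exactly the inputs on which A raises: KeyError for a string name not in
-- OPEN_STRING_MIDI, and ValueError (min of empty candidates) when root_pitch_class ∉ 0..11.
def Pre_choose_root_fret_py (string_name : String) (root_pitch_class : Int) : Prop :=
  (string_name = "E" ∨ string_name = "A" ∨ string_name = "D" ∨ string_name = "G" ∨
   string_name = "B" ∨ string_name = "e") ∧ 0 ≤ root_pitch_class ∧ root_pitch_class < 12
instance (string_name : String) (root_pitch_class : Int) : Decidable (Pre_choose_root_fret_py string_name root_pitch_class) := by unfold Pre_choose_root_fret_py; infer_instance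

def pvWitness_choose_root_fret_py : String × Int := ("E", 4)

def Spec_choose_root_fret_py (string_name : String) (root_pitch_class : Int) (out : Int) : Prop := out = choose_root_fret_py_alt string_name root_pitch_class
instance (string_name : String) (root_pitch_class : Int) (out : Int) : Decidable (Spec_choose_root_fret_py string_name root_pitch_class out) := by unfold Spec_choose_root_fret_py; infer_instance

-- ===== CLAIM (what is proved, stated in full; the proofs are below) =====
def Claim_equal_choose_root_fret_py : Prop := ∀ (string_name : String) (root_pitch_class : Int), Dom_choose_root_fret_py string_name root_pitch_class → Pre_choose_root_fret_py string_name root_pitch_class → Spec_choose_root_fret_py string_name root_pitch_class (choose_root_fret_py string_name root_pitch_class)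


-- ===== LEMMAS AND PROOFS =====

-- ===== VERDICT (by name: the statement is the Claim_ definition above) =====
theorem choose_root_fret_py_spec : Claim_equal_choose_root_fret_py := by
  intro s r _ hpre
  obtain ⟨hs, h0, h12⟩ := hpre
  unfold Spec_choose_root_fret_py
  rcases hs with h | h | h | h | h | h <;> subst h <;>
    interval_cases r <;> decide
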